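-- pv_equiv track=rewrite | github.com/malikaltinpinar/Mimari_Projesi | hamming_simulator.py | calculate_parity
-- ===== SOURCE A (Python) =====
-- def calculate_parity(encoded_data, parity_index):
--     parity = 0
--     i = parity_index
--     while i < len(encoded_data):
--         for j in range(parity_index + 1):
--             if i + j < len(encoded_data):
--                 parity ^= encoded_data[i + j]
--         i += 2 * (parity_index + 1)
--     return parity
-- ===== SOURCE B (Python) =====
-- def calculate_parity(encoded_data, parity_index):
--     # single flat pass: XOR in every bit whose index lies in an "on" block of width parity_index+1
--     p = parity_index + 1
--     parity = 0
--     for i in range(parity_index, len(encoded_data)):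
--         if ((i - parity_index) // p) % 2 == 0:
--             parity ^= encoded_data[i]
--     return parity
-- ===== Notes on version B (the rewrite author's own statement) =====
-- stated objective: simpler
-- what changed: Replaces A's outer while loop that jumps by 2*(parity_index+1) with an inner bounds-checked for over each block by one flat loop over range(parity_index, len(encoded_data)) with a block-parity predicate ((i - parity_index) // p) % 2 == 0 and a single running XOR accumulator.
import Mathlib
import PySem

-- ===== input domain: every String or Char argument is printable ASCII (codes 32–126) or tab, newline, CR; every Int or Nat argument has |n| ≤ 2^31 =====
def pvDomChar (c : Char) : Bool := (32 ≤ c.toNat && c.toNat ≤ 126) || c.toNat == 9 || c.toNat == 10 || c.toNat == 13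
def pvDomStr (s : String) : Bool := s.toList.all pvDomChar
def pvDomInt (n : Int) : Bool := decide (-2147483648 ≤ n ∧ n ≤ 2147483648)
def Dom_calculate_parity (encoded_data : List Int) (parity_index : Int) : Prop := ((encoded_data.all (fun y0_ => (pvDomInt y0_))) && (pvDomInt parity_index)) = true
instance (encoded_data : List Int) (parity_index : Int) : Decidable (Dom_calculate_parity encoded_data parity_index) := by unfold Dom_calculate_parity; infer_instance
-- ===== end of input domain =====

-- B replaces A's while-loop over blocks (inner bounds-checked for, outer jump by 2*(parity_index+1))
-- by one flat loop over range(parity_index, len) with a block-parity predicate; equal return values proved for parity_index ≥ 0.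

-- ===== PORT A =====
-- A's while loop: i advances by 2*(parity_index+1); the '0 ≤ parity_index' conjunct in the guard is only a
-- totality guard (for parity_index < 0 the Python while loop never terminates; those inputs are outside Pre_).
def pvALoop (encoded_data : List Int) (parity_index : Int) (i : Int) (parity : Int) : Int :=
  if h : 0 ≤ parity_index ∧ i < (encoded_data.length : Int) then
    pvALoop encoded_data parity_index (i + 2 * (parity_index + 1))
      ((PySem.List.pyRange 0 (parity_index + 1) 1).foldl
        (fun acc j =>
          if i + j < (encoded_data.length : Int) then
            PySem.Int.bxor acc (PySem.List.pyGetD encoded_data (i + j) 0)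
          else acc) parity)
  else parity
termination_by ((encoded_data.length : Int) - i).toNat
decreasing_by omega

def calculate_parity (encoded_data : List Int) (parity_index : Int) : Int :=
  pvALoop encoded_data parity_index parity_index 0

-- ===== PORT B =====
def calculate_parity_alt (encoded_data : List Int) (parity_index : Int) : Int :=
  (PySem.List.pyRange parity_index (encoded_data.length : Int) 1).foldl
    (fun acc i =>
      if PySem.Int.mod (PySem.Int.floordiv (i - parity_index) (parity_index + 1)) 2 = 0 then
        PySem.Int.bxor acc (PySem.List.pyGetD encoded_data i 0)
      else acc) 0

-- ===== PRECONDITION & SPEC =====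
-- Pre_ excludes exactly parity_index < 0, on which Python A never returns (its while loop diverges:
-- the step 2*(parity_index+1) is ≤ 0 while i stays below len(encoded_data), or is 0).
def Pre_calculate_parity (encoded_data : List Int) (parity_index : Int) : Prop :=
  0 ≤ parity_index

instance (encoded_data : List Int) (parity_index : Int) : Decidable (Pre_calculate_parity encoded_data parity_index) := by unfold Pre_calculate_parity; infer_instance

def pvWitness_calculate_parity : List Int × Int := ([1, 0, 1], 0)

def Spec_calculate_parity (encoded_data : List Int) (parity_index : Int) (out : Int) : Prop := out = calculate_parity_alt encoded_data parity_index
instance (encoded_data : List Int) (parity_index : Int) (out : Int) : Decidable (Spec_calculate_parity encoded_data parity_index out) := by unfold Spec_calculate_parity; infer_instance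

-- ===== CLAIM (what is proved, stated in full; the proofs are below) =====
def Claim_equal_calculate_parity : Prop := ∀ (encoded_data : List Int) (parity_index : Int), Dom_calculate_parity encoded_data parity_index → Pre_calculate_parity encoded_data parity_index → Spec_calculate_parity encoded_data parity_index (calculate_parity encoded_data parity_index)

-- ===== LEMMAS AND PROOFS =====

-- A's inner for-loop (j over [0, p) with an in-bounds guard) is the plain XOR fold over the clipped index range.
lemma pvInner_eq (encoded_data : List Int) (m : Nat) :
    ∀ (i acc : Int),
      (PySem.List.pyRange 0 (m : Int) 1).foldl
        (fun acc j =>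
          if i + j < (encoded_data.length : Int) then
            PySem.Int.bxor acc (PySem.List.pyGetD encoded_data (i + j) 0)
          else acc) acc
      = (PySem.List.pyRange i (min (i + (m : Int)) (encoded_data.length : Int)) 1).foldl
          (fun acc j => PySem.Int.bxor acc (PySem.List.pyGetD encoded_data j 0)) acc := by
  induction m with
  | zero =>
    intro i acc
    rw [PySem.List.pyRange_one_eq_nil (by omega), PySem.List.pyRange_one_eq_nil (by omega)]
    rfl
  | succ m ih =>
    intro i acc
    push_cast
    rw [PySem.List.pyRange_one_succ_right (by omega), List.foldl_append]
    by_cases hlt : i + (m : Int) < (encoded_data.length : Int)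
    · have h1 : min (i + ((m : Int) + 1)) (encoded_data.length : Int) = min (i + (m : Int)) (encoded_data.length : Int) + 1 := by omega
      rw [h1, PySem.List.pyRange_one_succ_right (by omega), List.foldl_append, ih]
      simp only [List.foldl_cons, List.foldl_nil]
      have h2 : min (i + (m : Int)) (encoded_data.length : Int) = i + (m : Int) := by omega
      rw [h2, if_pos hlt]
    · have h1 : min (i + ((m : Int) + 1)) (encoded_data.length : Int) = min (i + (m : Int)) (encoded_data.length : Int) := by omega
      rw [h1, ih]
      simp only [List.foldl_cons, List.foldl_nil]
      rw [if_neg hlt]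

-- B's predicate is true on the first half-block [i, i+p) of a block starting at i = parity_index + 2*p*k.
lemma pvPred_true (parity_index k j : Int) (hpi : 0 ≤ parity_index) (hk : 0 ≤ k)
    (hlo : parity_index + 2 * (parity_index + 1) * k ≤ j)
    (hhi : j < parity_index + 2 * (parity_index + 1) * k + (parity_index + 1)) :
    PySem.Int.mod (PySem.Int.floordiv (j - parity_index) (parity_index + 1)) 2 = 0 := by
  have hfd : PySem.Int.floordiv (j - parity_index) (parity_index + 1) = 2 * k := by
    rw [PySem.Int.floordiv_eq_iff_of_pos (by omega)]
    constructor <;> nlinarith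
  rw [hfd, (PySem.Int.mod_eq_zero_iff_dvd _ _).mpr ⟨k, by ring⟩]

-- … and false on the second half-block [i+p, i+2p).
lemma pvPred_false (parity_index k j : Int) (hpi : 0 ≤ parity_index) (hk : 0 ≤ k)
    (hlo : parity_index + 2 * (parity_index + 1) * k + (parity_index + 1) ≤ j)
    (hhi : j < parity_index + 2 * (parity_index + 1) * k + 2 * (parity_index + 1)) :
    ¬ PySem.Int.mod (PySem.Int.floordiv (j - parity_index) (parity_index + 1)) 2 = 0 := by
  have hfd : PySem.Int.floordiv (j - parity_index) (parity_index + 1) = 2 * k + 1 := by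
    rw [PySem.Int.floordiv_eq_iff_of_pos (by omega)]
    constructor <;> nlinarith
  rw [hfd, PySem.Int.mod_eq_emod_of_pos (by omega)]
  omega

-- Main invariant: from the start of any even block, A's remaining loop equals B's remaining flat fold.
lemma pvMain (encoded_data : List Int) (parity_index : Int) (hpi : 0 ≤ parity_index) :
    ∀ (N : Nat) (k i : Int), 0 ≤ k → i = parity_index + 2 * (parity_index + 1) * k →
      (encoded_data.length : Int) - i ≤ (N : Int) →
      ∀ acc : Int,
        pvALoop encoded_data parity_index i acc
        = (PySem.List.pyRange i (encoded_data.length : Int) 1).foldl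
            (fun acc i =>
              if PySem.Int.mod (PySem.Int.floordiv (i - parity_index) (parity_index + 1)) 2 = 0 then
                PySem.Int.bxor acc (PySem.List.pyGetD encoded_data i 0)
              else acc) acc := by
  intro N
  induction N with
  | zero =>
    intro k i hk hi hN acc
    have hni : (encoded_data.length : Int) ≤ i := by omega
    rw [pvALoop, dif_neg (by omega), PySem.List.pyRange_one_eq_nil hni]
    rfl
  | succ N ih =>
    intro k i hk hi hN acc
    by_cases hlt : i < (encoded_data.length : Int)
    · rw [pvALoop, dif_pos ⟨hpi, hlt⟩]
      have htail := ih (k + 1) (i + 2 * (parity_index + 1)) (by omega)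
        (by rw [hi]; ring) (by omega)
        ((PySem.List.pyRange 0 (parity_index + 1) 1).foldl
          (fun acc j =>
            if i + j < (encoded_data.length : Int) then
              PySem.Int.bxor acc (PySem.List.pyGetD encoded_data (i + j) 0)
            else acc) acc)
      rw [htail]
      -- split B's remaining range into the two half-blocks and the tail
      have hsplit1 : PySem.List.pyRange i (encoded_data.length : Int) 1
          = PySem.List.pyRange i (min (i + (parity_index + 1)) (encoded_data.length : Int)) 1
            ++ PySem.List.pyRange (min (i + (parity_index + 1)) (encoded_data.length : Int)) (encoded_data.length : Int) 1 :=
        PySem.List.pyRange_one_append _ _ _ (by omega) (by omega)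
      have hsplit2 : PySem.List.pyRange (min (i + (parity_index + 1)) (encoded_data.length : Int)) (encoded_data.length : Int) 1
          = PySem.List.pyRange (min (i + (parity_index + 1)) (encoded_data.length : Int)) (min (i + 2 * (parity_index + 1)) (encoded_data.length : Int)) 1
            ++ PySem.List.pyRange (min (i + 2 * (parity_index + 1)) (encoded_data.length : Int)) (encoded_data.length : Int) 1 :=
        PySem.List.pyRange_one_append _ _ _ (by omega) (by omega)
      rw [hsplit1, hsplit2, List.foldl_append, List.foldl_append]
      -- first half-block: B's predicate is true there, and the plain fold is A's inner loop
      have hseg1 :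
          (PySem.List.pyRange i (min (i + (parity_index + 1)) (encoded_data.length : Int)) 1).foldl
            (fun acc j =>
              if PySem.Int.mod (PySem.Int.floordiv (j - parity_index) (parity_index + 1)) 2 = 0 then
                PySem.Int.bxor acc (PySem.List.pyGetD encoded_data j 0)
              else acc) acc
          = (PySem.List.pyRange i (min (i + (parity_index + 1)) (encoded_data.length : Int)) 1).foldl
              (fun acc j => PySem.Int.bxor acc (PySem.List.pyGetD encoded_data j 0)) acc := by
        apply PySem.List.foldl_congr_mem
        intro a j hj
        have hj' := PySem.List.mem_pyRange_one.mp hj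
        refine if_pos (pvPred_true parity_index k j hpi hk ?_ ?_)
        · rw [← hi]; omega
        · rw [← hi]; omega
      have hinner := pvInner_eq encoded_data (parity_index + 1).toNat i acc
      have hcast : ((parity_index + 1).toNat : Int) = parity_index + 1 := by omega
      rw [hcast] at hinner
      -- second half-block: B's predicate is false there, the fold is the identity
      have hseg2 : ∀ b : Int,
          (PySem.List.pyRange (min (i + (parity_index + 1)) (encoded_data.length : Int)) (min (i + 2 * (parity_index + 1)) (encoded_data.length : Int)) 1).foldl
            (fun acc j =>
              if PySem.Int.mod (PySem.Int.floordiv (j - parity_index) (parity_index + 1)) 2 = 0 then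
                PySem.Int.bxor acc (PySem.List.pyGetD encoded_data j 0)
              else acc) b = b := by
        intro b
        rw [PySem.List.foldl_congr_mem _ _ (fun acc _ => acc) b ?_, PySem.List.foldl_ignore]
        intro a j hj
        have hj' := PySem.List.mem_pyRange_one.mp hj
        refine if_neg (pvPred_false parity_index k j hpi hk ?_ ?_)
        · rw [← hi]; omega
        · rw [← hi]; omega
      rw [hseg1, ← hinner, hseg2]
      by_cases hend : i + 2 * (parity_index + 1) ≤ (encoded_data.length : Int)
      · have hm : min (i + 2 * (parity_index + 1)) (encoded_data.length : Int) = i + 2 * (parity_index + 1) := by omega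
        rw [hm]
      · rw [PySem.List.pyRange_one_eq_nil
            (show (encoded_data.length : Int) ≤ i + 2 * (parity_index + 1) by omega),
          PySem.List.pyRange_one_eq_nil
            (show (encoded_data.length : Int) ≤ min (i + 2 * (parity_index + 1)) (encoded_data.length : Int) by omega)]
    · have hni : (encoded_data.length : Int) ≤ i := by omega
      rw [pvALoop, dif_neg (by omega), PySem.List.pyRange_one_eq_nil hni]
      rfl

-- ===== VERDICT (by name: the statement is the Claim_ definition above) =====
theorem calculate_parity_spec : Claim_equal_calculate_parity := by
  intro encoded_data parity_index _ hpre
  have hp0 : 0 ≤ parity_index := hpre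
  unfold Spec_calculate_parity calculate_parity calculate_parity_alt
  exact pvMain encoded_data parity_index hp0 encoded_data.length 0 parity_index le_rfl
    (by ring) (by omega) 0
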